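-- pv_equiv track=rewrite | github.com/honu-shell-utions/python | sandbox/project_euler/201-250/223_almost_right-angled_triangles01.py | find_em
-- ===== SOURCE A (Python) =====
-- def is_triangle(a,b,c):
--     if a+b > c and a+c > b and b+c > a:
--         return True
--     return False
--
-- def is_almost(a,b,c):
--     return a**2 + b**2 == c**2 + 1
--
-- def find_em(limit):
--     count = 0
--     for a in range(1,limit):
--         for b in range(a,limit):
--             for c in range(b,limit):
--                 if not is_triangle(a,b,c) or a + b + c > limit:
--                     break
--                 if is_almost(a,b,c):
--                     count += 1
--     return count
-- ===== SOURCE B (Python) =====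
-- def _isqrt(n):
--     # hand-written integer square root (Newton's method), floor(sqrt(n)) for n >= 0
--     if n == 0:
--         return 0
--     x = n
--     y = (x + 1) // 2
--     while 0 < y and y < x:
--         x = y
--         y = (x + n // x) // 2
--     return x
--
-- def find_em(limit):
--     count = 0
--     for a in range(1, limit):
--         aa = a * a
--         for b in range(a, limit):
--             s = aa + b * b - 1
--             c = _isqrt(s)
--             if c * c == s and a + b + c <= limit:
--                 count += 1
--     return count
-- ===== Notes on version B (the rewrite author's own statement) =====
-- stated objective: faster
-- what changed: The inner c-loop is replaced by computing c = isqrt(a^2+b^2-1) directly (hand-written Newton integer sqrt) and testing that it is a perfect square with perimeter <= limit.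
import Mathlib
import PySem

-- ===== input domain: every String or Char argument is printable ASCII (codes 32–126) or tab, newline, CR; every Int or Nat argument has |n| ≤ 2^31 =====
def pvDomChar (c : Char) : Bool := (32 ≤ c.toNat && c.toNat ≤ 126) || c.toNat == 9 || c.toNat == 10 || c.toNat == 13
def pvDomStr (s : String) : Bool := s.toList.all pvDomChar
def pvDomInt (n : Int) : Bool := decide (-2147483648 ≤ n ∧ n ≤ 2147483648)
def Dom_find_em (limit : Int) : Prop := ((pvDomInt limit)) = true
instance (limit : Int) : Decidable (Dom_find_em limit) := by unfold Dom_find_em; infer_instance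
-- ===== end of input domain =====

-- B replaces A's innermost c-loop by computing c directly as the integer square root
-- of a^2+b^2-1 (hand-written Newton iteration) and testing exactness (objective: faster).

-- ===== PORT A =====
def is_triangle (a b c : Int) : Bool :=
  if a + b > c && a + c > b && b + c > a then true else false

def is_almost (a b c : Int) : Bool :=
  a ^ 2 + b ^ 2 == c ^ 2 + 1

-- the innermost `for c in range(b, limit)` loop with its `break`
def innerC (a b limit count : Int) : List Int → Int
  | [] => count
  | c :: cs =>
      if !is_triangle a b c || a + b + c > limit then count
      else innerC a b limit (if is_almost a b c then count + 1 else count) cs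

def find_em (limit : Int) : Int :=
  (PySem.List.pyRange 1 limit 1).foldl (fun count a =>
    (PySem.List.pyRange a limit 1).foldl (fun count b =>
      innerC a b limit count (PySem.List.pyRange b limit 1)) count) 0

-- ===== PORT B =====
-- Newton iteration of _isqrt (the `while 0 < y and y < x` loop)
def isqrtLoop (n x y : Int) : Int :=
  if _h : 0 < y ∧ y < x then
    isqrtLoop n y (PySem.Int.floordiv (y + PySem.Int.floordiv n y) 2)
  else x
termination_by x.toNat
decreasing_by omega

def isqrt_ (n : Int) : Int :=
  if n == 0 then 0
  else isqrtLoop n n (PySem.Int.floordiv (n + 1) 2)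

def find_em_alt (limit : Int) : Int :=
  (PySem.List.pyRange 1 limit 1).foldl (fun count a =>
    let aa := a * a
    (PySem.List.pyRange a limit 1).foldl (fun count b =>
      let s := aa + b * b - 1
      let c := isqrt_ s
      if c * c == s && a + b + c ≤ limit then count + 1 else count) count) 0

-- ===== PRECONDITION & SPEC =====
def Spec_find_em (limit : Int) (out : Int) : Prop := out = find_em_alt limit
instance (limit : Int) (out : Int) : Decidable (Spec_find_em limit out) := by unfold Spec_find_em; infer_instance

-- ===== CLAIM (what is proved, stated in full; the proofs are below) =====
def Claim_equal_find_em : Prop := ∀ (limit : Int), Dom_find_em limit → Spec_find_em limit (find_em limit)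

-- ===== LEMMAS AND PROOFS =====

-- floor square root of a nonnegative Int, via Nat.sqrt
def sqrtI (n : Int) : Int := (Nat.sqrt n.toNat : Int)

theorem sqrtI_spec (n : Int) (hn : 0 ≤ n) :
    0 ≤ sqrtI n ∧ sqrtI n ^ 2 ≤ n ∧ n < (sqrtI n + 1) ^ 2 := by
  have hle : (Nat.sqrt n.toNat) ^ 2 ≤ n.toNat := Nat.sqrt_le' _
  have hlt : n.toNat < (Nat.sqrt n.toNat + 1) ^ 2 := by
    have := Nat.lt_succ_sqrt' n.toNat; omega
  have e : ((n.toNat : Int)) = n := Int.toNat_of_nonneg hn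
  unfold sqrtI
  refine ⟨by positivity, ?_, ?_⟩
  · calc ((Nat.sqrt n.toNat : Int)) ^ 2 = ((Nat.sqrt n.toNat ^ 2 : Nat) : Int) := by push_cast; ring
      _ ≤ (n.toNat : Int) := by exact_mod_cast hle
      _ = n := e
  · calc n = (n.toNat : Int) := e.symm
      _ < (((Nat.sqrt n.toNat + 1) ^ 2 : Nat) : Int) := by exact_mod_cast hlt
      _ = ((Nat.sqrt n.toNat : Int) + 1) ^ 2 := by push_cast; ring

theorem sqrtI_pos (n : Int) (hn : 1 ≤ n) : 1 ≤ sqrtI n := by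
  obtain ⟨h0, hle, hlt⟩ := sqrtI_spec n (by omega)
  nlinarith

-- a Newton step from y ≥ 1 never drops below the true floor sqrt
theorem newton_ge (n y : Int) (hn : 1 ≤ n) (hy : 1 ≤ y) :
    sqrtI n ≤ PySem.Int.floordiv (y + PySem.Int.floordiv n y) 2 := by
  obtain ⟨h0, hle, hlt⟩ := sqrtI_spec n (by omega)
  set s := sqrtI n with hs
  have h1 : 2 * s - y ≤ PySem.Int.floordiv n y := by
    rw [PySem.Int.le_floordiv_iff_mul_le (by omega)]
    nlinarith [sq_nonneg (s - y)]
  rw [PySem.Int.le_floordiv_iff_mul_le (by omega)]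
  omega

theorem isqrtLoop_eq (n : Int) (hn : 1 ≤ n) :
    ∀ x y : Int, sqrtI n ≤ x → sqrtI n ≤ y → (x ≤ y → x ^ 2 ≤ n) →
      isqrtLoop n x y = sqrtI n := by
  intro x y
  induction x, y using isqrtLoop.induct n with
  | case1 x y h ih =>
      intro hx hy hxy
      rw [isqrtLoop, dif_pos h]
      have hy1 : 1 ≤ y := h.1
      apply ih
      · exact hy
      · exact newton_ge n y hn hy1
      · intro hle
        have h2 : 2 * y ≤ y + PySem.Int.floordiv n y := by
          have := (PySem.Int.le_floordiv_iff_mul_le (a := y + PySem.Int.floordiv n y) (b := 2) (q := y) (by omega)).mp hle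
          omega
        have h3 : y ≤ PySem.Int.floordiv n y := by omega
        have h4 := (PySem.Int.le_floordiv_iff_mul_le (by omega : (0:Int) < y)).mp h3
        nlinarith
  | case2 x y h =>
      intro hx hy hxy
      rw [isqrtLoop, dif_neg h]
      have hs1 : 1 ≤ sqrtI n := sqrtI_pos n hn
      have hxley : x ≤ y := by omega
      have hx2 : x ^ 2 ≤ n := hxy hxley
      obtain ⟨h0, hle, hlt⟩ := sqrtI_spec n (by omega)
      nlinarith

theorem isqrt_eq (n : Int) (hn : 1 ≤ n) : isqrt_ n = sqrtI n := by
  unfold isqrt_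
  rw [if_neg (by simp; omega)]
  obtain ⟨h0, hle, hlt⟩ := sqrtI_spec n (by omega)
  have hs1 : 1 ≤ sqrtI n := sqrtI_pos n hn
  apply isqrtLoop_eq n hn
  · nlinarith
  · rw [PySem.Int.le_floordiv_iff_mul_le (by omega)]
    nlinarith [sq_nonneg (sqrtI n - 1)]
  · intro h2
    have h3 := (PySem.Int.le_floordiv_iff_mul_le (a := n + 1) (b := 2) (q := n) (by omega)).mp h2
    nlinarith

-- A's c-loop (with break) counts 1 iff sqrt(a^2+b^2-1) is exact, fits the perimeter
-- and lies at or beyond the loop's current start c0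
theorem innerC_eq (a b limit : Int) (ha : 1 ≤ a) (hab : a ≤ b) :
    ∀ k : Nat, ∀ c0 count : Int, b ≤ c0 → (limit - c0).toNat ≤ k →
      innerC a b limit count (PySem.List.pyRange c0 limit 1) =
        count + (if isqrt_ (a*a + b*b - 1) * isqrt_ (a*a + b*b - 1) = a*a + b*b - 1
                    ∧ a + b + isqrt_ (a*a + b*b - 1) ≤ limit
                    ∧ c0 ≤ isqrt_ (a*a + b*b - 1) then 1 else 0) := by
  have hs1 : (1:Int) ≤ a*a + b*b - 1 := by nlinarith
  have hceq : isqrt_ (a*a + b*b - 1) = sqrtI (a*a + b*b - 1) := isqrt_eq _ hs1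
  obtain ⟨h0, hle, hlt⟩ := sqrtI_spec (a*a + b*b - 1) (by omega)
  set c' := sqrtI (a*a + b*b - 1) with hc'
  rw [hceq]
  have hcb : b ≤ c' := by nlinarith
  have hclt : c' < a + b := by nlinarith
  intro k
  induction k with
  | zero =>
      intro c0 count hbc0 hk
      have hlc0 : limit ≤ c0 := by omega
      rw [PySem.List.pyRange_one_eq_nil (by omega)]
      have hno : ¬(c' * c' = a*a + b*b - 1 ∧ a + b + c' ≤ limit ∧ c0 ≤ c') := by
        rintro ⟨h1, h2, h3⟩; omega
      rw [if_neg hno]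
      simp [innerC]
  | succ k ih =>
      intro c0 count hbc0 hk
      by_cases hlc0 : limit ≤ c0
      · rw [PySem.List.pyRange_one_eq_nil (by omega)]
        have hno : ¬(c' * c' = a*a + b*b - 1 ∧ a + b + c' ≤ limit ∧ c0 ≤ c') := by
          rintro ⟨h1, h2, h3⟩; omega
        rw [if_neg hno]
        simp [innerC]
      · rw [PySem.List.pyRange_one_cons (by omega)]
        by_cases hbrk : a + b ≤ c0 ∨ limit < a + b + c0
        · have htri : (!is_triangle a b c0 || a + b + c0 > limit) = true := by
            simp [is_triangle]
            omega
          rw [innerC, if_pos htri]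
          have hno : ¬(c' * c' = a*a + b*b - 1 ∧ a + b + c' ≤ limit ∧ c0 ≤ c') := by
            rintro ⟨h1, h2, h3⟩; omega
          rw [if_neg hno]
          omega
        · push Not at hbrk
          obtain ⟨hok1, hok2⟩ := hbrk
          have htri : (!is_triangle a b c0 || a + b + c0 > limit) = false := by
            simp [is_triangle]
            omega
          rw [innerC, if_neg (by simp [htri])]
          by_cases hhit : c0 * c0 = a*a + b*b - 1
          · have hc0c : c0 = c' := by nlinarith
            have halm : is_almost a b c0 = true := by
              simp [is_almost]; nlinarith
            rw [if_pos halm, ih (c0+1) (count+1) (by omega) (by omega)]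
            have hnot : ¬(c' * c' = a*a + b*b - 1 ∧ a + b + c' ≤ limit ∧ c0 + 1 ≤ c') := by
              rintro ⟨h1, h2, h3⟩; omega
            have hyes : (c' * c' = a*a + b*b - 1 ∧ a + b + c' ≤ limit ∧ c0 ≤ c') := by
              exact ⟨by rw [← hc0c]; exact hhit, by omega, by omega⟩
            rw [if_neg hnot, if_pos hyes]
            ring
          · have halm : is_almost a b c0 = false := by
              simp [is_almost]; intro h; exact absurd (by nlinarith : c0 * c0 = a*a + b*b - 1) hhit
            rw [if_neg (by simp [halm]), ih (c0+1) count (by omega) (by omega)]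
            congr 1
            apply if_congr _ rfl rfl
            constructor
            · rintro ⟨h1, h2, h3⟩; exact ⟨h1, h2, by omega⟩
            · rintro ⟨h1, h2, h3⟩
              refine ⟨h1, h2, ?_⟩
              rcases lt_or_eq_of_le h3 with h | h
              · omega
              · exact absurd (by rw [h]; exact h1) hhit

-- the exact root is never below b (since a ≥ 1)
theorem cstar_ge (a b : Int) (ha : 1 ≤ a) (hab : a ≤ b) : b ≤ isqrt_ (a*a + b*b - 1) := by
  have hs1 : (1:Int) ≤ a*a + b*b - 1 := by nlinarith
  rw [isqrt_eq _ hs1]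
  obtain ⟨h0, hle, hlt⟩ := sqrtI_spec (a*a + b*b - 1) (by omega)
  nlinarith

theorem foldl_congr_int (l : List Int) (f g : Int → Int → Int)
    (h : ∀ x ∈ l, ∀ acc, f acc x = g acc x) :
    ∀ init, l.foldl f init = l.foldl g init := by
  induction l with
  | nil => intro _; rfl
  | cons x t ih =>
      intro init
      simp only [List.foldl_cons]
      rw [h x (List.mem_cons_self) init]
      exact ih (fun y hy acc => h y (List.mem_cons_of_mem _ hy) acc) _

-- ===== VERDICT (by name: the statement is the Claim_ definition above) =====
theorem find_em_spec : Claim_equal_find_em := by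
  intro limit _
  unfold Spec_find_em find_em find_em_alt
  apply foldl_congr_int
  intro a hma count
  rw [PySem.List.mem_pyRange_one] at hma
  apply foldl_congr_int
  intro b hmb count'
  rw [PySem.List.mem_pyRange_one] at hmb
  have ha : 1 ≤ a := hma.1
  have hab : a ≤ b := hmb.1
  have key := innerC_eq a b limit ha hab (limit - b).toNat b count' le_rfl le_rfl
  rw [key]
  have hb := cstar_ge a b ha hab
  set cs := isqrt_ (a*a + b*b - 1) with hcs
  show count' + _ = if cs * cs == a * a + b * b - 1 && decide (a + b + cs ≤ limit) then count' + 1 else count'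
  by_cases h1 : cs * cs = a*a + b*b - 1 <;> by_cases h2 : a + b + cs ≤ limit <;>
    simp [h1, h2, hb]
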